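-- pv_equiv track=rewrite | github.com/enan501/Algorithm-study | kakao/2021recruit/채용자.py | calQueryKeys
-- ===== SOURCE A (Python) =====
-- from itertools import product
--
-- oper = {'cpp': 1000, 'java': 2000, 'python': 3000, 'backend': 100, 'frontend': 200, 'junior': 10, 'senior': 20,
--         'chicken': 1, 'pizza': 2}
--
-- def calKey(sepInfo):
--
--     key = 0
--     for i in sepInfo:
--         key += oper[i]
--     return key
--
-- def calQueryKeys(sepQuery):
--     keys = []
--     lang = ['cpp','java','python']
--     part = ['frontend','backend']
--     exp = ['junior','senior']
--     food = ['pizza','chicken']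
--     conds = [lang,part,exp,food]
--     rQuery = []
--     for q,index in zip(sepQuery, range(0,len(sepQuery))):
--         if q == '-':
--             rQuery.append(conds[index])
--         else:
--             rQuery.append([q])
--     for rQ in list(product(*rQuery)):
--         keys.append(calKey(rQ))
--     return keys
-- ===== SOURCE B (Python) =====
-- oper = {'cpp': 1000, 'java': 2000, 'python': 3000, 'backend': 100, 'frontend': 200, 'junior': 10, 'senior': 20,
--         'chicken': 1, 'pizza': 2}
--
-- def calQueryKeys(sepQuery):
--     conds = [['cpp', 'java', 'python'], ['frontend', 'backend'],
--              ['junior', 'senior'], ['pizza', 'chicken']]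
--     acc = [0]
--     for index, q in enumerate(sepQuery):
--         tokens = conds[index] if q == '-' else [q]
--         offs = [oper[t] for t in tokens]
--         acc = [a + v for a in acc for v in offs]
--     return acc
-- ===== Notes on version B (the rewrite author's own statement) =====
-- stated objective: alternative
-- what changed: B replaces itertools.product plus a full calKey re-summation per combination by a single left fold that distributes the sums: per position it builds the list of oper-value offsets and sets acc = [a + v for a in acc for v in offs], never materialising the token tuples.
import Mathlib
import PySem

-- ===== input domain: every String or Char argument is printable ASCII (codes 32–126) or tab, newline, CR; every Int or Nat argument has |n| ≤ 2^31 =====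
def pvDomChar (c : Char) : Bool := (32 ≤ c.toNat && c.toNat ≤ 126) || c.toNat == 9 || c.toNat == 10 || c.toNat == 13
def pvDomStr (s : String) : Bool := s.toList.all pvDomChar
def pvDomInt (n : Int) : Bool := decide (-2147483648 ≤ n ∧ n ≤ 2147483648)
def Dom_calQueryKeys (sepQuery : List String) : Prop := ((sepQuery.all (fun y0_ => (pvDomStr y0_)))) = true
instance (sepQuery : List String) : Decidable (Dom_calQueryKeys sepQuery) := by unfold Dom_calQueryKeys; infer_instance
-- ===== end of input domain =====

-- B computes the same key list with a single distributive left fold (acc = [a+v ...]) instead of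
-- itertools.product plus a per-combination calKey re-summation (objective: alternative decomposition).

-- ===== PORT A =====
-- the module-level dict 'oper'
def operD : PySem.Dict String Int :=
  PySem.Dict.ofList [("cpp", 1000), ("java", 2000), ("python", 3000), ("backend", 100),
    ("frontend", 200), ("junior", 10), ("senior", 20), ("chicken", 1), ("pizza", 2)]

-- oper[i] raises KeyError on a missing key; Pre_ excludes that, so the total stand-in getD _ 0 is exact
def calKey (sepInfo : List String) : Int :=
  sepInfo.foldl (fun key i => key + operD.getD i 0) 0

-- itertools.product(*rQuery) in product order (first factor slowest)
def pyProduct : List (List String) → List (List String)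
  | [] => [[]]
  | l :: ls => l.flatMap (fun x => (pyProduct ls).map (fun r => x :: r))

def calQueryKeys (sepQuery : List String) : List Int :=
  let conds : List (List String) :=
    [["cpp", "java", "python"], ["frontend", "backend"], ["junior", "senior"], ["pizza", "chicken"]]
  -- conds[index] raises IndexError for index ≥ 4; Pre_ excludes that, so pyGetD _ _ [] is exact
  let rQuery := (sepQuery.zip (PySem.List.pyRange 0 (sepQuery.length : Int) 1)).foldl
    (fun rQ p => if p.1 = "-" then rQ ++ [PySem.List.pyGetD conds p.2 []] else rQ ++ [[p.1]]) []
  (pyProduct rQuery).foldl (fun keys rQ => keys ++ [calKey rQ]) []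

-- ===== PORT B =====
def calQueryKeys_alt (sepQuery : List String) : List Int :=
  let conds : List (List String) :=
    [["cpp", "java", "python"], ["frontend", "backend"], ["junior", "senior"], ["pizza", "chicken"]]
  (PySem.List.enumerate sepQuery).foldl
    (fun acc p =>
      let tokens := if p.2 = "-" then PySem.List.pyGetD conds p.1 [] else [p.2]
      let offs := tokens.map (fun t => operD.getD t 0)
      acc.flatMap (fun a => offs.map (fun v => a + v))) [0]

-- ===== PRECONDITION & SPEC =====
-- Pre_ excludes exactly the inputs on which A raises: a '-' at position ≥ 4 (IndexError on conds[index])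
-- or a non-'-' token not in oper (KeyError in calKey).
def Pre_calQueryKeys (sepQuery : List String) : Prop :=
  ∀ i, (h : i < sepQuery.length) →
    (sepQuery[i] = "-" → i < 4) ∧
    (sepQuery[i] ≠ "-" →
      sepQuery[i] ∈ ["cpp", "java", "python", "backend", "frontend", "junior", "senior", "chicken", "pizza"])
instance (sepQuery : List String) : Decidable (Pre_calQueryKeys sepQuery) := by
  unfold Pre_calQueryKeys; infer_instance

def pvWitness_calQueryKeys : List String := ["cpp", "-", "junior", "-"]

def Spec_calQueryKeys (sepQuery : List String) (out : List Int) : Prop := out = calQueryKeys_alt sepQuery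
instance (sepQuery : List String) (out : List Int) : Decidable (Spec_calQueryKeys sepQuery out) := by
  unfold Spec_calQueryKeys; infer_instance

-- ===== CLAIM (what is proved, stated in full; the proofs are below) =====
def Claim_equal_calQueryKeys : Prop := ∀ (sepQuery : List String), Dom_calQueryKeys sepQuery → Pre_calQueryKeys sepQuery → Spec_calQueryKeys sepQuery (calQueryKeys sepQuery)

-- ===== LEMMAS AND PROOFS =====

-- the token-list chosen at position (i, q)
def tokenFn (conds : List (List String)) (p : Int × String) : List String :=
  if p.2 = "-" then PySem.List.pyGetD conds p.1 [] else [p.2]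

lemma zip_pyRange_eq (xs : List String) (s : Int) :
    xs.zip (PySem.List.pyRange s (s + (xs.length : Int)) 1) =
      (PySem.List.enumerate xs s).map (fun p => (p.2, p.1)) := by
  induction xs generalizing s with
  | nil => simp [PySem.List.enumerate_nil]
  | cons x xs ih =>
    rw [PySem.List.pyRange_one_cons (by simp only [List.length_cons]; push_cast; omega)]
    simp only [List.zip_cons_cons, PySem.List.enumerate_cons, List.map_cons]
    have h2 : s + ((x :: xs).length : Int) = (s + 1) + (xs.length : Int) := by
      simp only [List.length_cons]; push_cast; omega
    rw [h2, ih]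

lemma calKey_cons (x : String) (r : List String) :
    calKey (x :: r) = operD.getD x 0 + calKey r := by
  simp only [calKey, List.foldl_cons]
  rw [PySem.List.foldl_add (g := fun t => operD.getD t 0),
      PySem.List.foldl_add (g := fun t => operD.getD t 0)]
  ring

-- the distributive fold equals flatMapping the product keys over the accumulator
lemma fold_step_eq (ls : List (List String)) :
    ∀ (acc : List Int),
      ls.foldl (fun acc l =>
          acc.flatMap (fun a => (l.map (fun t => operD.getD t 0)).map (fun v => a + v))) acc =
        acc.flatMap (fun a => (pyProduct ls).map (fun rQ => a + calKey rQ)) := by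
  induction ls with
  | nil =>
    intro acc
    simp [pyProduct, calKey]
  | cons l ls ih =>
    intro acc
    rw [List.foldl_cons, ih]
    simp only [pyProduct, List.flatMap_assoc, List.flatMap_map, List.map_flatMap, List.map_map]
    simp [Function.comp_def, calKey_cons, add_assoc]

theorem calQueryKeys_eq (sepQuery : List String) :
    calQueryKeys sepQuery = calQueryKeys_alt sepQuery := by
  simp only [calQueryKeys, calQueryKeys_alt]
  set conds : List (List String) :=
    [["cpp", "java", "python"], ["frontend", "backend"], ["junior", "senior"], ["pizza", "chicken"]] with hconds
  -- A side: the rQuery loop builds the mapped token lists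
  have hz := zip_pyRange_eq sepQuery 0
  rw [zero_add] at hz
  rw [hz, List.foldl_map]
  dsimp only
  rw [show (fun (rQ : List (List String)) (p : Int × String) =>
        if p.2 = "-" then rQ ++ [PySem.List.pyGetD conds p.1 []] else rQ ++ [[p.2]]) =
      (fun rQ p => rQ ++ [tokenFn conds p]) from
    funext fun rQ => funext fun p => by simp only [tokenFn]; split <;> rfl]
  rw [PySem.List.foldl_append_singleton_eq_map, PySem.List.foldl_append_singleton_eq_map,
    List.nil_append, List.nil_append]
  -- B side: the distributive fold
  have hB := fold_step_eq ((PySem.List.enumerate sepQuery 0).map (tokenFn conds)) [0]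
  rw [List.foldl_map] at hB
  simp only [tokenFn] at hB
  rw [hB]
  simp

-- ===== VERDICT (by name: the statement is the Claim_ definition above) =====
theorem calQueryKeys_spec : Claim_equal_calQueryKeys := by
  intro sepQuery _ _
  unfold Spec_calQueryKeys
  exact calQueryKeys_eq sepQuery
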